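-- pv_equiv track=rewrite | github.com/marchal-duval/openstack-register | openstack_register/openstack_register/utils.py | check_password_constraints
-- ===== SOURCE A (Python) =====
-- def check_password_constraints(password):
--     """
--
--     :param password:
--     :return:
--     """
--     attributes = {}
--     # password = request.GET['password']
--     constraint = {'lower': False,
--                   'upper': False,
--                   'spe': False,
--                   'number': False}
--     index = 0
--     total = 0
--     taille = len(password)
--     spe = ['~', '!', '@', '#', '$', '%', '^', '&', '*', '(', ')', '_', '+',
--            '{', '}', '"', ':', ';', '\', ''', '[', ']', '<', '>']
--
--     while index < taille:
--         var = password[index]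
--         if var.islower():
--             constraint['lower'] = True
--         if var.isupper():
--             constraint['upper'] = True
--         if var in spe:
--             constraint['spe'] = True
--         if var.isdigit():
--             constraint['number'] = True
--         index += 1
--
--     if constraint['lower']:
--         total += 1
--     if constraint['upper']:
--         total += 1
--     if constraint['spe']:
--         total += 1
--     if constraint['number']:
--         total += 1
--
--     if len(password) < 8:
--         attributes['check'] = 'character'
--     elif total < 3:
--         attributes['check'] = 'require'
--     elif len(password) >= 8 and total >= 3:
--         attributes['check'] = 'success'
--     else:
--         attributes['check'] = 'error'
--     return attributes
-- ===== SOURCE B (Python) =====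
-- def check_password_constraints(password):
--     # Four independent character-class scans instead of one index loop with a flag dict.
--     # spe holds exactly the characters A's list effectively matches (its escaping mishap
--     # makes the "', " entry a 3-char string that never equals a single character).
--     spe = set('~!@#$%^&*()_+{}":;[]<>')
--     total = (any(c.islower() for c in password)
--              + any(c.isupper() for c in password)
--              + any(c in spe for c in password)
--              + any(c.isdigit() for c in password))
--     if len(password) < 8:
--         check = 'character'
--     elif total < 3:
--         check = 'require'
--     else:
--         check = 'success'
--     return {'check': check}
-- ===== Notes on version B (the rewrite author's own statement) =====
-- stated objective: simpler
-- what changed: Replaces the index-based while loop maintaining a four-flag dict (and the later dict re-reads) with four independent any() character-class scans summed directly, drops the unreachable final else-branch of the decision cascade, and tests specials against a set holding exactly the characters A's list effectively matches (A's mangled three-character entry never equals a single character).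
import Mathlib
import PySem

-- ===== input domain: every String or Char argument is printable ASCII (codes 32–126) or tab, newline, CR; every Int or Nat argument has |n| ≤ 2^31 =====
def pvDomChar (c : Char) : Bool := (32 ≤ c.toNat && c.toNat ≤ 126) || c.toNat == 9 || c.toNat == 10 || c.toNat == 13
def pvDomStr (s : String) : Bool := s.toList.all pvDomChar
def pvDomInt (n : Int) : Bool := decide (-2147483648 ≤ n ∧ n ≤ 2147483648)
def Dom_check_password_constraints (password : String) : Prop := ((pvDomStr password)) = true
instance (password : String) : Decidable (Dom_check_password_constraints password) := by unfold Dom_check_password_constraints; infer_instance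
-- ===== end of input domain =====

-- B replaces A's single index-based while loop over a four-flag dict (plus the later
-- dict re-reads) by four independent any-scans summed directly (objective: simpler).

-- ===== PORT A =====
-- A's spe list exactly as its source denotes it (the "', " entry is A's escaping artefact:
-- a 3-character string that a 1-character string can never equal)
def pvSpeA : List String :=
  ["~", "!", "@", "#", "$", "%", "^", "&", "*", "(", ")", "_", "+",
   "{", "}", "\"", ":", ";", "', ", "[", "]", "<", ">"]

-- one iteration of A's while-loop body (var = password[index], a 1-character string)
def pvStepA (var : Char) (constraint : PySem.Dict String Bool) : PySem.Dict String Bool :=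
  let constraint := if PySem.Chars.islower var then constraint.insert "lower" true else constraint
  let constraint := if PySem.Chars.isupper var then constraint.insert "upper" true else constraint
  let constraint := if pvSpeA.contains (String.ofList [var]) then constraint.insert "spe" true else constraint
  let constraint := if PySem.Chars.isdigit var then constraint.insert "number" true else constraint
  constraint

-- A's while loop: index walks password[0], password[1], … in order
def pvLoopA : List Char → PySem.Dict String Bool → PySem.Dict String Bool
  | [], constraint => constraint
  | var :: rest, constraint => pvLoopA rest (pvStepA var constraint)

def check_password_constraints (password : String) : List (String × String) :=
  let constraint : PySem.Dict String Bool :=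
    ((((PySem.Dict.empty).insert "lower" false).insert "upper" false).insert "spe" false).insert "number" false
  let constraint := pvLoopA password.toList constraint
  let total : Int := 0
  let total := if constraint.getD "lower" false then total + 1 else total
  let total := if constraint.getD "upper" false then total + 1 else total
  let total := if constraint.getD "spe" false then total + 1 else total
  let total := if constraint.getD "number" false then total + 1 else total
  let attributes : PySem.Dict String String := PySem.Dict.empty
  let attributes :=
    if PySem.Str.len password < 8 then attributes.insert "check" "character"
    else if total < 3 then attributes.insert "check" "require"
    else if PySem.Str.len password ≥ 8 ∧ total ≥ 3 then attributes.insert "check" "success"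
    else attributes.insert "check" "error"
  attributes.items

-- ===== PORT B =====
def pvSpeB : PySem.Set Char := PySem.Set.ofList ("~!@#$%^&*()_+{}\":;[]<>".toList)

def check_password_constraints_alt (password : String) : List (String × String) :=
  let cs := password.toList
  let total : Int :=
    (if cs.any (fun c => PySem.Chars.islower c) then 1 else 0)
    + (if cs.any (fun c => PySem.Chars.isupper c) then 1 else 0)
    + (if cs.any (fun c => PySem.Set.contains pvSpeB c) then 1 else 0)
    + (if cs.any (fun c => PySem.Chars.isdigit c) then 1 else 0)
  let check :=
    if PySem.Str.len password < 8 then "character"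
    else if total < 3 then "require"
    else "success"
  [("check", check)]

-- ===== PRECONDITION & SPEC =====
def Spec_check_password_constraints (password : String) (out : List (String × String)) : Prop := out = check_password_constraints_alt password
instance (password : String) (out : List (String × String)) : Decidable (Spec_check_password_constraints password out) := by unfold Spec_check_password_constraints; infer_instance

-- ===== CLAIM (what is proved, stated in full; the proofs are below) =====
def Claim_equal_check_password_constraints : Prop := ∀ (password : String), Dom_check_password_constraints password → Spec_check_password_constraints password (check_password_constraints password)

-- ===== LEMMAS AND PROOFS =====

lemma pv_eq_lit (c : Char) (s : String) : (String.ofList [c] = s) ↔ ([c] = s.toList) := by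
  conv_lhs => rw [show s = String.ofList s.toList from String.ofList_toList.symm]
  rw [String.ofList_inj]

-- A's 1-char-string membership in its spe list coincides with B's char-set membership
lemma pv_spe_char (c : Char) :
    pvSpeA.contains (String.ofList [c]) = PySem.Set.contains pvSpeB c := by
  rw [Bool.eq_iff_iff]
  simp only [pvSpeA, pvSpeB, PySem.Set.contains]
  simp [pv_eq_lit, PySem.Set.mem_ofList,
    show ("~!@#$%^&*()_+{}\":;[]<>" : String).toList = ['~','!','@','#','$','%','^','&','*','(',')','_','+','{','}','"',':',';','[',']','<','>'] from rfl,
    show ("', " : String).toList = ['\'', ',', ' '] from rfl,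
    show ("~" : String).toList = ['~'] from rfl, show ("!" : String).toList = ['!'] from rfl, show ("@" : String).toList = ['@'] from rfl, show ("#" : String).toList = ['#'] from rfl, show ("$" : String).toList = ['$'] from rfl, show ("%" : String).toList = ['%'] from rfl, show ("^" : String).toList = ['^'] from rfl, show ("&" : String).toList = ['&'] from rfl, show ("*" : String).toList = ['*'] from rfl, show ("(" : String).toList = ['('] from rfl, show (")" : String).toList = [')'] from rfl, show ("_" : String).toList = ['_'] from rfl, show ("+" : String).toList = ['+'] from rfl, show ("{" : String).toList = ['{'] from rfl, show ("}" : String).toList = ['}'] from rfl, show ("\"" : String).toList = ['"'] from rfl, show (":" : String).toList = [':'] from rfl, show (";" : String).toList = [';'] from rfl, show ("[" : String).toList = ['['] from rfl, show ("]" : String).toList = [']'] from rfl, show ("<" : String).toList = ['<'] from rfl, show (">" : String).toList = ['>'] from rfl]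

lemma pv_step_getD (c : Char) (d : PySem.Dict String Bool) :
    (pvStepA c d).getD "lower" false = (d.getD "lower" false || PySem.Chars.islower c) ∧
    (pvStepA c d).getD "upper" false = (d.getD "upper" false || PySem.Chars.isupper c) ∧
    (pvStepA c d).getD "spe" false = (d.getD "spe" false || PySem.Set.contains pvSpeB c) ∧
    (pvStepA c d).getD "number" false = (d.getD "number" false || PySem.Chars.isdigit c) := by
  rw [← pv_spe_char c]
  refine ⟨?_, ?_, ?_, ?_⟩ <;>
    (unfold pvStepA; split_ifs <;> simp_all [PySem.Dict.getD_insert])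

lemma pv_loop_getD (cs : List Char) (d : PySem.Dict String Bool) :
    (pvLoopA cs d).getD "lower" false = (d.getD "lower" false || cs.any (fun c => PySem.Chars.islower c)) ∧
    (pvLoopA cs d).getD "upper" false = (d.getD "upper" false || cs.any (fun c => PySem.Chars.isupper c)) ∧
    (pvLoopA cs d).getD "spe" false = (d.getD "spe" false || cs.any (fun c => PySem.Set.contains pvSpeB c)) ∧
    (pvLoopA cs d).getD "number" false = (d.getD "number" false || cs.any (fun c => PySem.Chars.isdigit c)) := by
  induction cs generalizing d with
  | nil => simp [pvLoopA]
  | cons c cs ih =>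
    obtain ⟨h1, h2, h3, h4⟩ := ih (pvStepA c d)
    obtain ⟨s1, s2, s3, s4⟩ := pv_step_getD c d
    refine ⟨?_, ?_, ?_, ?_⟩ <;>
      simp [pvLoopA, h1, h2, h3, h4, s1, s2, s3, s4, Bool.or_assoc]

-- ===== VERDICT (by name: the statement is the Claim_ definition above) =====
theorem check_password_constraints_spec : Claim_equal_check_password_constraints := by
  intro password _
  unfold Spec_check_password_constraints check_password_constraints check_password_constraints_alt
  obtain ⟨h1, h2, h3, h4⟩ := pv_loop_getD password.toList
    (((((PySem.Dict.empty).insert "lower" false).insert "upper" false).insert "spe" false).insert "number" false)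
  simp only [h1, h2, h3, h4,
    show ((((((PySem.Dict.empty).insert "lower" false).insert "upper" false).insert "spe" false).insert "number" false) : PySem.Dict String Bool).getD "lower" false = false by simp [PySem.Dict.getD_insert],
    show ((((((PySem.Dict.empty).insert "lower" false).insert "upper" false).insert "spe" false).insert "number" false) : PySem.Dict String Bool).getD "upper" false = false by simp [PySem.Dict.getD_insert],
    show ((((((PySem.Dict.empty).insert "lower" false).insert "upper" false).insert "spe" false).insert "number" false) : PySem.Dict String Bool).getD "spe" false = false by simp [PySem.Dict.getD_insert],
    show ((((((PySem.Dict.empty).insert "lower" false).insert "upper" false).insert "spe" false).insert "number" false) : PySem.Dict String Bool).getD "number" false = false by simp,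
    Bool.false_or]
  generalize password.toList.any (fun c => PySem.Chars.islower c) = bl
  generalize password.toList.any (fun c => PySem.Chars.isupper c) = bu
  generalize password.toList.any (fun c => PySem.Set.contains pvSpeB c) = bs
  generalize password.toList.any (fun c => PySem.Chars.isdigit c) = bn
  cases bl <;> cases bu <;> cases bs <;> cases bn <;>
    (norm_num
     split_ifs <;> first | rfl | omega)
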